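-- pv_equiv track=rewrite | github.com/Kirill-Pinyaev/ege_inf | 15.06/22.py | f
-- ===== SOURCE A (Python) =====
-- def f(a):
--     x = a
--     l = 0
--     m = 0
--     while x > 0:
--         l += 1
--         if x % 2 == 0:
--             m += (x % 10) // 2
--         x //= 10
--     return l, m
-- ===== SOURCE B (Python) =====
-- def f(a):
--     if a <= 0:
--         return 0, 0
--     s = str(a)
--     return len(s), sum((ord(c) - 48) // 2 for c in s if (ord(c) - 48) % 2 == 0)
-- ===== Notes on version B (the rewrite author's own statement) =====
-- stated objective: idiomatic
-- what changed: B iterates once over the decimal string str(a) (via character codes) instead of peeling digits arithmetically in a while loop, computing the length from the string and the half-sum of even digits with a generator expression.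
import Mathlib
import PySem

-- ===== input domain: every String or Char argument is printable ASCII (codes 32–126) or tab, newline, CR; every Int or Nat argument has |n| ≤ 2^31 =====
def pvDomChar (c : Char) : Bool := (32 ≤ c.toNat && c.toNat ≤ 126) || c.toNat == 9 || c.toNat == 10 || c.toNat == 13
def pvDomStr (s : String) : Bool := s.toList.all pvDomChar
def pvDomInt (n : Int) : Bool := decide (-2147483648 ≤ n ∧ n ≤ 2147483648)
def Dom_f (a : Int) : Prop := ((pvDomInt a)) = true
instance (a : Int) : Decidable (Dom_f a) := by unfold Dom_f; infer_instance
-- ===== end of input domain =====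

-- B iterates once over the decimal string str(a) instead of peeling digits arithmetically in a while loop; same cost, more idiomatic.


-- ===== PORT A =====
-- while x > 0: l += 1; if x % 2 == 0: m += (x % 10) // 2; x //= 10
def fLoop (x l m : Int) : Int × Int :=
  if 0 < x then
    fLoop (PySem.Int.floordiv x 10) (l + 1)
      (if PySem.Int.mod x 2 = 0 then m + PySem.Int.floordiv (PySem.Int.mod x 10) 2 else m)
  else (l, m)
termination_by x.toNat
decreasing_by
  have h10 : PySem.Int.floordiv x 10 = x / 10 := PySem.Int.floordiv_eq_ediv_of_pos (by omega)
  rw [h10]; omega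

def f (a : Int) : Int × Int := fLoop a 0 0

-- ===== PORT B =====
def f_alt (a : Int) : Int × Int :=
  if a ≤ 0 then (0, 0)
  else
    let s := (PySem.Int.toStr a).toList
    ((s.length : Int),
      ((s.filter (fun c => PySem.Int.mod ((c.toNat : Int) - 48) 2 = 0)).map
        (fun c => PySem.Int.floordiv ((c.toNat : Int) - 48) 2)).sum)

-- ===== PRECONDITION & SPEC =====
def Spec_f (a : Int) (out : Int × Int) : Prop := out = f_alt a
instance (a : Int) (out : Int × Int) : Decidable (Spec_f a out) := by unfold Spec_f; infer_instance

-- ===== CLAIM (what is proved, stated in full; the proofs are below) =====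
def Claim_equal_f : Prop := ∀ (a : Int), Dom_f a → Spec_f a (f a)

-- ===== LEMMAS AND PROOFS =====
-- digit-string characterisation of Nat.toDigits used on the B side
def rep (n : Nat) : List Char :=
  if _h : n < 10 then [Nat.digitChar n] else rep (n / 10) ++ [Nat.digitChar (n % 10)]
decreasing_by exact Nat.div_lt_self (by omega) (by omega)

lemma toDigitsCore_eq_rep : ∀ (fuel n : Nat) (ds : List Char), n < fuel →
    Nat.toDigitsCore 10 fuel n ds = rep n ++ ds := by
  intro fuel
  induction fuel with
  | zero => intro n ds h; omega
  | succ f ih =>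
    intro n ds h
    rw [Nat.toDigitsCore]
    by_cases h10 : n / 10 = 0
    · simp only [h10]
      rw [rep]
      have : n < 10 := by omega
      simp [this, Nat.mod_eq_of_lt this]
    · simp only [h10]
      rw [ih (n / 10) _ (by omega)]
      conv_rhs => rw [rep]
      have : ¬ n < 10 := by omega
      simp [this]

lemma toStr_pos_eq_rep (a : Int) (h : 0 < a) :
    (PySem.Int.toStr a).toList = rep a.toNat := by
  rw [PySem.Int.toList_toStr]
  have : ¬ a < 0 := by omega
  simp only [PySem.Int.toChars, if_neg this]
  rw [Nat.toDigits]
  simpa using toDigitsCore_eq_rep (a.toNat + 1) a.toNat [] (by omega)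

-- the B-side per-string statistic
def msum (s : List Char) : Int :=
  ((s.filter (fun c => PySem.Int.mod ((c.toNat : Int) - 48) 2 = 0)).map
    (fun c => PySem.Int.floordiv ((c.toNat : Int) - 48) 2)).sum

lemma msum_append (s t : List Char) : msum (s ++ t) = msum s + msum t := by
  simp [msum]

lemma digitChar_toNat (n : Nat) (h : n < 10) : ((Nat.digitChar n).toNat : Int) - 48 = (n : Int) := by
  interval_cases n <;> decide

lemma fLoop_eq_aux : ∀ (k : Nat) (x l m : Int), x.toNat ≤ k → 0 < x →
    fLoop x l m = (l + (rep x.toNat).length, m + msum (rep x.toNat)) := by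
  intro k
  induction k with
  | zero => intro x l m hk hx; omega
  | succ k ih =>
  intro x l m hk hx
  rw [fLoop, if_pos hx]
  have hfd : PySem.Int.floordiv x 10 = x / 10 := PySem.Int.floordiv_eq_ediv_of_pos (by omega)
  have hmd : PySem.Int.mod x 10 = x % 10 := PySem.Int.mod_eq_emod_of_pos (by omega)
  have hm2 : PySem.Int.mod x 2 = x % 2 := PySem.Int.mod_eq_emod_of_pos (by omega)
  have hlast : ((Nat.digitChar (x.toNat % 10)).toNat : Int) - 48 = (x.toNat % 10 : Nat) :=
    digitChar_toNat _ (by omega)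
  have hx10 : ((x.toNat % 10 : Nat) : Int) = x % 10 := by omega
  have hstep : msum [Nat.digitChar (x.toNat % 10)] =
      if PySem.Int.mod x 2 = 0 then PySem.Int.floordiv (PySem.Int.mod x 10) 2 else 0 := by
    have hfd2 : PySem.Int.floordiv (PySem.Int.mod x 10) 2 = (x % 10) / 2 :=
      (PySem.Int.floordiv_eq_ediv_of_pos (by omega)).trans (by rw [hmd])
    have hm2' : PySem.Int.mod ((x % 10)) 2 = (x % 10) % 2 := PySem.Int.mod_eq_emod_of_pos (by omega)
    have hpar : (x % 10) % 2 = x % 2 := by omega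
    by_cases he : x % 2 = 0
    · have hdvd : (2:Int) ∣ (x % 10) := by omega
      simp [msum, hlast, hx10, he, hdvd]
    · have hdvd : ¬ (2:Int) ∣ (x % 10) := by omega
      simp [msum, hlast, hx10, he, hdvd]
  by_cases hsmall : x < 10
  · have hz : ¬ (0 < x / 10) := by omega
    rw [fLoop, if_neg (by rw [hfd]; omega)]
    have hrep : rep x.toNat = [Nat.digitChar x.toNat] := by
      rw [rep]; simp [show x.toNat < 10 by omega]
    have : x.toNat % 10 = x.toNat := by omega
    rw [hrep]
    simp only [Prod.mk.injEq]
    refine ⟨by simp, ?_⟩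
    rw [this] at hstep
    rw [hstep]
    split <;> simp
  · have hrec := ih (x / 10) (l + 1)
      (if PySem.Int.mod x 2 = 0 then m + PySem.Int.floordiv (PySem.Int.mod x 10) 2 else m)
      (by omega) (by omega)
    rw [hfd, hrec]
    have hrep : rep x.toNat = rep (x.toNat / 10) ++ [Nat.digitChar (x.toNat % 10)] := by
      rw [rep]; simp [show ¬ x.toNat < 10 by omega]
    have hdiv : (x / 10).toNat = x.toNat / 10 := by omega
    rw [hrep, msum_append, hdiv, hstep]
    simp only [Prod.mk.injEq]
    refine ⟨by simp; omega, ?_⟩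
    split
    · simp; ring
    · simp

lemma fLoop_eq (x l m : Int) (hx : 0 < x) :
    fLoop x l m = (l + (rep x.toNat).length, m + msum (rep x.toNat)) :=
  fLoop_eq_aux x.toNat x l m le_rfl hx

-- ===== VERDICT (by name: the statement is the Claim_ definition above) =====
theorem f_spec : Claim_equal_f := by
  intro a _
  unfold Spec_f f f_alt
  by_cases h : a ≤ 0
  · rw [fLoop, if_neg (by omega)]; simp [h]
  · have hp : 0 < a := by omega
    rw [fLoop_eq a 0 0 hp]
    simp only [if_neg h, toStr_pos_eq_rep a hp, msum]
    simp
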